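-- pv_equiv track=rewrite | github.com/utsav0092/DSA | My_Learning/1_Step/4_lec_basic_maths/4_GFG_GCD.py | gcdandlcm
-- ===== SOURCE A (Python) =====
-- def gcdandlcm(a, b):
--     l = []
--     for i in range(1, min(a, b)+1):
--         if a%i == 0 and b%i == 0:
--             l.append(i)
--     lcm = ((a*b)//max(l))
--     l.append(lcm)
--     return l
-- ===== SOURCE B (Python) =====
-- def gcdandlcm(a, b):
--     g, r = a, b
--     while r:
--         g, r = r, g % r
--     l = [i for i in range(1, g + 1) if g % i == 0]
--     l.append((a * b) // max(l))
--     return l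
-- ===== Notes on version B (the rewrite author's own statement) =====
-- stated objective: faster
-- what changed: Instead of trial-testing every i up to min(a,b) against both numbers, B computes gcd(a,b) with Euclid's algorithm and lists the divisors of that gcd, so the scan shrinks from min(a,b) to gcd(a,b) steps.
import Mathlib
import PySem

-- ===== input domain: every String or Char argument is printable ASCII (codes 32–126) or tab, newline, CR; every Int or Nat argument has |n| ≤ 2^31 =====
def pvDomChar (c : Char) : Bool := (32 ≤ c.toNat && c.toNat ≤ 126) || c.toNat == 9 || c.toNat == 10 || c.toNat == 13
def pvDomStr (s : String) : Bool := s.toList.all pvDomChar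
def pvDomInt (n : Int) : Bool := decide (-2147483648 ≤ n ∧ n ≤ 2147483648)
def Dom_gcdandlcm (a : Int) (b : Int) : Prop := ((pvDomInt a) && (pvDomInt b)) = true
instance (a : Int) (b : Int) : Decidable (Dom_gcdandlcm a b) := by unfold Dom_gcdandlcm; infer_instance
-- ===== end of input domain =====

-- B replaces A's trial division up to min(a,b) by Euclid's gcd followed by listing the gcd's divisors (faster in a timing run).

-- ===== PORT A =====
def gcdandlcm (a : Int) (b : Int) : List Int :=
  let l := (PySem.List.pyRange 1 (min a b + 1) 1).foldl
    (fun acc i => if PySem.Int.mod a i == 0 && PySem.Int.mod b i == 0 then acc ++ [i] else acc) []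
  match PySem.List.max? l (fun y => y) with
  | none => []   -- Python's max([]) raises ValueError here; these inputs are outside Pre_
  | some m => l ++ [PySem.Int.floordiv (a * b) m]

-- ===== PORT B =====
-- 'while r: g, r = r, g % r'
def pvEuclid (g : Int) (r : Int) : Int :=
  if h : r = 0 then g else pvEuclid r (PySem.Int.mod g r)
termination_by r.natAbs
decreasing_by
  rcases lt_trichotomy r 0 with hr | hr | hr
  · have h1 := PySem.Int.mod_neg_bounds g hr
    omega
  · exact absurd hr h
  · have h1 := PySem.Int.mod_nonneg g hr
    have h2 := PySem.Int.mod_lt g hr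
    omega

def gcdandlcm_alt (a : Int) (b : Int) : List Int :=
  let g := pvEuclid a b
  let l := (PySem.List.pyRange 1 (g + 1) 1).filter (fun i => PySem.Int.mod g i == 0)
  match PySem.List.max? l (fun y => y) with
  | none => []   -- Python's max([]) raises ValueError here; these inputs are outside Pre_
  | some m => l ++ [PySem.Int.floordiv (a * b) m]

-- ===== PRECONDITION & SPEC =====
-- A raises ValueError (max of an empty list) whenever min(a,b) ≤ 0, i.e. unless both arguments are ≥ 1.
def Pre_gcdandlcm (a : Int) (b : Int) : Prop := 1 ≤ a ∧ 1 ≤ b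
instance (a : Int) (b : Int) : Decidable (Pre_gcdandlcm a b) := by unfold Pre_gcdandlcm; infer_instance
def pvWitness_gcdandlcm : Int × Int := (12, 18)

def Spec_gcdandlcm (a : Int) (b : Int) (out : List Int) : Prop := out = gcdandlcm_alt a b
instance (a : Int) (b : Int) (out : List Int) : Decidable (Spec_gcdandlcm a b out) := by unfold Spec_gcdandlcm; infer_instance

-- ===== CLAIM (what is proved, stated in full; the proofs are below) =====
def Claim_equal_gcdandlcm : Prop := ∀ (a : Int) (b : Int), Dom_gcdandlcm a b → Pre_gcdandlcm a b → Spec_gcdandlcm a b (gcdandlcm a b)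

-- ===== LEMMAS AND PROOFS =====

-- gcd recurrence for Int.gcd with emod
theorem pv_gcd_mod (a b : Int) : Int.gcd b (a % b) = Int.gcd a b := by
  apply Nat.dvd_antisymm
  · apply Nat.dvd_gcd
    · have hdvd : (Int.gcd b (a % b) : Int) ∣ a := by
        have h1 : (Int.gcd b (a % b) : Int) ∣ b := Int.gcd_dvd_left ..
        have h2 : (Int.gcd b (a % b) : Int) ∣ a % b := Int.gcd_dvd_right ..
        calc (Int.gcd b (a % b) : Int) ∣ a % b + b * (a / b) := dvd_add h2 (h1.mul_right _)
          _ = a := Int.emod_add_mul_ediv a b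
      simpa using Int.natAbs_dvd_natAbs.mpr hdvd
    · exact by simpa using Int.natAbs_dvd_natAbs.mpr (Int.gcd_dvd_left b (a % b))
  · apply Nat.dvd_gcd
    · exact by simpa using Int.natAbs_dvd_natAbs.mpr (Int.gcd_dvd_right (a := a) (b := b) ..)
    · have hdvd : (Int.gcd a b : Int) ∣ a % b := by
        rw [Int.emod_def]
        exact dvd_sub (Int.gcd_dvd_left ..) ((Int.gcd_dvd_right ..).mul_right _)
      simpa using Int.natAbs_dvd_natAbs.mpr hdvd

-- pvEuclid computes Int.gcd on nonnegative inputs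
theorem pvEuclid_eq_gcd_aux (n : Nat) : ∀ (a b : Int), 0 ≤ a → 0 ≤ b → b.natAbs ≤ n →
    pvEuclid a b = (Int.gcd a b : Int) := by
  induction n with
  | zero =>
    intro a b ha hb hn
    have hb0 : b = 0 := by omega
    subst hb0
    rw [pvEuclid]
    simp [Int.natAbs_of_nonneg ha]
  | succ n ih =>
    intro a b ha hb hn
    rw [pvEuclid]
    by_cases h : b = 0
    · subst h
      simp [Int.natAbs_of_nonneg ha]
    · have hbpos : 0 < b := lt_of_le_of_ne hb (Ne.symm h)
      have hm : PySem.Int.mod a b = a % b := PySem.Int.mod_eq_emod_of_pos hbpos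
      have h1 : 0 ≤ a % b := Int.emod_nonneg a h
      have h2 : a % b < b := Int.emod_lt_of_pos a hbpos
      simp only [h, dite_false, hm]
      rw [ih b (a % b) hb h1 (by omega), pv_gcd_mod]

theorem pvEuclid_eq_gcd (a b : Int) (ha : 0 ≤ a) (hb : 0 ≤ b) :
    pvEuclid a b = (Int.gcd a b : Int) :=
  pvEuclid_eq_gcd_aux b.natAbs a b ha hb le_rfl

-- i divides a and b iff i divides gcd a b
theorem pv_dvd_gcd_iff (i a b : Int) : (i ∣ a ∧ i ∣ b) ↔ i ∣ (Int.gcd a b : Int) := by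
  constructor
  · rintro ⟨h1, h2⟩
    have := Int.dvd_gcd (Int.natAbs_dvd.mpr h1) (Int.natAbs_dvd.mpr h2)
    exact Int.natAbs_dvd.mp (Int.natCast_dvd_natCast.mpr this)
  · intro h
    exact ⟨h.trans (Int.gcd_dvd_left ..), h.trans (Int.gcd_dvd_right ..)⟩

-- ===== VERDICT (by name: the statement is the Claim_ definition above) =====
theorem gcdandlcm_spec : Claim_equal_gcdandlcm := by
  intro a b _ hpre
  obtain ⟨ha, hb⟩ := hpre
  unfold Spec_gcdandlcm gcdandlcm gcdandlcm_alt
  have hGa : (Int.gcd a b : Int) ∣ a := Int.gcd_dvd_left ..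
  have hGb : (Int.gcd a b : Int) ∣ b := Int.gcd_dvd_right ..
  have hGpos : 0 < (Int.gcd a b : Int) := by
    have : Int.gcd a b ≠ 0 := by
      simp only [ne_eq, Int.gcd_eq_zero_iff, not_and]
      intro h1
      omega
    exact_mod_cast Nat.pos_of_ne_zero this
  have hGmin : (Int.gcd a b : Int) ≤ min a b :=
    le_min (Int.le_of_dvd (by omega) hGa) (Int.le_of_dvd (by omega) hGb)
  have heu : pvEuclid a b = (Int.gcd a b : Int) := pvEuclid_eq_gcd a b (by omega) (by omega)
  -- A's collected list equals B's divisor list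
  have hfilter :
      (PySem.List.pyRange 1 (min a b + 1) 1).filter
          (fun i => PySem.Int.mod a i == 0 && PySem.Int.mod b i == 0) =
      (PySem.List.pyRange 1 ((Int.gcd a b : Int) + 1) 1).filter
          (fun i => PySem.Int.mod (Int.gcd a b : Int) i == 0) := by
    rw [PySem.List.pyRange_one_append 1 ((Int.gcd a b : Int) + 1) (min a b + 1) (by omega) (by omega),
        List.filter_append]
    have htail :
        (PySem.List.pyRange ((Int.gcd a b : Int) + 1) (min a b + 1) 1).filter
          (fun i => PySem.Int.mod a i == 0 && PySem.Int.mod b i == 0) = [] := by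
      rw [List.filter_eq_nil_iff]
      intro i hi
      rw [PySem.List.mem_pyRange_one] at hi
      simp only [Bool.and_eq_true, beq_iff_eq, PySem.Int.mod_eq_zero_iff_dvd, not_and]
      intro hia hib
      have hdvd : i ∣ (Int.gcd a b : Int) := (pv_dvd_gcd_iff i a b).mp ⟨hia, hib⟩
      have := Int.le_of_dvd hGpos hdvd
      omega
    rw [htail, List.append_nil]
    apply List.filter_congr
    intro i _
    apply Bool.eq_iff_iff.mpr
    simp only [Bool.and_eq_true, beq_iff_eq, PySem.Int.mod_eq_zero_iff_dvd]
    exact pv_dvd_gcd_iff i a b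
  -- max of the divisor list is the gcd
  have hGmem : (Int.gcd a b : Int) ∈
      (PySem.List.pyRange 1 ((Int.gcd a b : Int) + 1) 1).filter
        (fun i => PySem.Int.mod (Int.gcd a b : Int) i == 0) := by
    rw [List.mem_filter, PySem.List.mem_pyRange_one]
    refine ⟨by omega, ?_⟩
    simp
  have hmaxG : PySem.List.max?
      ((PySem.List.pyRange 1 ((Int.gcd a b : Int) + 1) 1).filter
        (fun i => PySem.Int.mod (Int.gcd a b : Int) i == 0)) (fun y => y) =
      some (Int.gcd a b : Int) := by
    cases hmax : PySem.List.max?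
        ((PySem.List.pyRange 1 ((Int.gcd a b : Int) + 1) 1).filter
          (fun i => PySem.Int.mod (Int.gcd a b : Int) i == 0)) (fun y => y) with
    | none =>
      rw [PySem.List.max?_eq_none_iff] at hmax
      rw [hmax] at hGmem
      simp at hGmem
    | some m =>
      have hm1 := PySem.List.max?_mem hmax
      have hle := PySem.List.max?_isMax hmax
      have hmG : m ≤ (Int.gcd a b : Int) := by
        have hdvd : m ∣ (Int.gcd a b : Int) := by
          have := (List.mem_filter.mp hm1).2
          simpa [PySem.Int.mod_eq_zero_iff_dvd] using this
        exact Int.le_of_dvd hGpos hdvd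
      have hGm : (Int.gcd a b : Int) ≤ m := hle _ hGmem
      rw [le_antisymm hmG hGm]
  simp only [PySem.List.foldl_append_if_eq_filter, List.nil_append]
  rw [hfilter, heu]
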